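-- pv_equiv track=rewrite | github.com/RamananVr/Leetcodepython | arrays/2757_generate_circular_array_values.py | generateCircularArrayWithCycle
-- ===== SOURCE A (Python) =====
-- from typing import List
--
-- def generateCircularArrayWithCycle(n: int, start: int) -> List[int]:
--     """
--     Approach that detects if we enter a cycle early.
--
--     Args:
--         n: Length of array and modulo base
--         start: Starting value
--
--     Returns:
--         Generated circular array
--
--     Time Complexity: O(n) worst case, potentially better if cycle detected
--     Space Complexity: O(n)
--     """
--     nums = []
--     current = start % n
--     seen = set()
--
--     for i in range(n):
--         if current in seen and len(nums) > 1:
--             # We've seen this value before, indicating a potential cycle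
--             # But we still need to complete the full array of length n
--             pass
--
--         seen.add(current)
--         nums.append(current)
--
--         if i < n - 1:
--             current = (current + i + 1) % n
--
--     return nums
-- ===== SOURCE B (Python) =====
-- from typing import List
--
-- def generateCircularArrayWithCycle(n: int, start: int) -> List[int]:
--     base = start % n  # evaluated even when n == 0, matching the ZeroDivisionError
--     return [(base + i * (i + 1) // 2) % n for i in range(n)]
-- ===== Notes on version B (the rewrite author's own statement) =====
-- stated objective: simpler
-- what changed: Replaced the running accumulator with a dead 'seen' set and cycle branch by a direct closed form: nums[i] = (start%n + i*(i+1)//2) % n, computed per index in a comprehension.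
import Mathlib
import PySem

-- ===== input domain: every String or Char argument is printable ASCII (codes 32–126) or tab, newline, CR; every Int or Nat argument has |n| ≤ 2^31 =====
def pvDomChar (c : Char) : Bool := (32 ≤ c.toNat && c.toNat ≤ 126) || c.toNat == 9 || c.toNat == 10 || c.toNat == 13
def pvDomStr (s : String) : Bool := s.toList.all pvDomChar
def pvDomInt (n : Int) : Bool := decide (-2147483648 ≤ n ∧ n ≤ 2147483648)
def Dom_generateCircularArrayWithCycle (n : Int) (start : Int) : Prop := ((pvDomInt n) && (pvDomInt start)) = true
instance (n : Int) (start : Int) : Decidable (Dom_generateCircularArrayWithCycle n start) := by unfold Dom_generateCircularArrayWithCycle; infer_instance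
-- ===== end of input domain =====

-- B replaces A's running accumulator, dead 'seen' set and no-op cycle branch by the
-- closed form nums[i] = (start % n + i*(i+1)//2) % n, computed independently per index (simpler).

-- ===== PORT A =====
-- state: (nums, current, seen); the Python 'if current in seen and len(nums) > 1: pass'
-- branch is a no-op (pass) and changes no state, so it contributes nothing to the fold.
def generateCircularArrayWithCycle (n : Int) (start : Int) : List Int :=
  let current := PySem.Int.mod start n
  let st := (PySem.List.pyRange 0 n 1).foldl
    (fun (st : List Int × Int × PySem.Set Int) i =>
      let seen := st.2.2.add st.2.1
      let nums := st.1 ++ [st.2.1]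
      let current := if i < n - 1 then PySem.Int.mod (st.2.1 + i + 1) n else st.2.1
      (nums, current, seen))
    ([], current, PySem.Set.ofList [])
  st.1

-- ===== PORT B =====
def generateCircularArrayWithCycle_alt (n : Int) (start : Int) : List Int :=
  let base := PySem.Int.mod start n
  (PySem.List.pyRange 0 n 1).map
    (fun i => PySem.Int.mod (base + PySem.Int.floordiv (i * (i + 1)) 2) n)

-- ===== PRECONDITION & SPEC =====
-- Pre_ excludes exactly n = 0, where Python's 'start % n' raises ZeroDivisionError (in A and in B).
def Pre_generateCircularArrayWithCycle (n : Int) (start : Int) : Prop := n ≠ 0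
instance (n : Int) (start : Int) : Decidable (Pre_generateCircularArrayWithCycle n start) := by unfold Pre_generateCircularArrayWithCycle; infer_instance
def pvWitness_generateCircularArrayWithCycle : Int × Int := (5, 3)

def Spec_generateCircularArrayWithCycle (n : Int) (start : Int) (out : List Int) : Prop := out = generateCircularArrayWithCycle_alt n start
instance (n : Int) (start : Int) (out : List Int) : Decidable (Spec_generateCircularArrayWithCycle n start out) := by unfold Spec_generateCircularArrayWithCycle; infer_instance

-- ===== CLAIM (what is proved, stated in full; the proofs are below) =====
def Claim_equal_generateCircularArrayWithCycle : Prop := ∀ (n : Int) (start : Int), Dom_generateCircularArrayWithCycle n start → Pre_generateCircularArrayWithCycle n start → Spec_generateCircularArrayWithCycle n start (generateCircularArrayWithCycle n start)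

-- ===== LEMMAS AND PROOFS =====

-- Python mod r = PySem.Int.mod x n is the unique representative of x mod n in the
-- divisor-sign half-open interval.
theorem pymod_unique (n x r : Int) (hn : n ≠ 0) (hd : n ∣ (x - r))
    (hb : (0 < n → 0 ≤ r ∧ r < n) ∧ (n < 0 → n < r ∧ r ≤ 0)) :
    PySem.Int.mod x n = r := by
  have hx : PySem.Int.floordiv x n * n + PySem.Int.mod x n = x := PySem.Int.floordiv_mul_add_mod x n
  have hdvd : n ∣ (PySem.Int.mod x n - r) := by
    have : PySem.Int.mod x n - r = (x - r) - PySem.Int.floordiv x n * n := by linarith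
    rw [this]
    exact dvd_sub hd (Dvd.intro_left _ rfl)
  have habs : |PySem.Int.mod x n - r| < |n| := by
    rcases lt_or_gt_of_ne hn with hneg | hpos
    · have h1 := PySem.Int.mod_neg_bounds x hneg
      have h2 := hb.2 hneg
      rw [abs_of_neg hneg]
      rw [abs_lt]; constructor <;> linarith [h1.1, h1.2, h2.1, h2.2]
    · have h1 := PySem.Int.mod_nonneg x hpos
      have h2 := PySem.Int.mod_lt x hpos
      have h3 := hb.1 hpos
      rw [abs_of_pos hpos]
      rw [abs_lt]; constructor <;> linarith [h3.1, h3.2]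
  have hdvd' : |n| ∣ (PySem.Int.mod x n - r) := (abs_dvd _ _).mpr hdvd
  have := Int.eq_zero_of_abs_lt_dvd hdvd' habs
  linarith [this]

-- (a % n + b) % n = (a + b) % n  for Python mod, n ≠ 0
theorem pymod_add (n a b : Int) (hn : n ≠ 0) :
    PySem.Int.mod (PySem.Int.mod a n + b) n = PySem.Int.mod (a + b) n := by
  apply pymod_unique n _ _ hn
  · have h1 : PySem.Int.floordiv a n * n + PySem.Int.mod a n = a := PySem.Int.floordiv_mul_add_mod a n
    have h2 : PySem.Int.floordiv (a + b) n * n + PySem.Int.mod (a + b) n = (a + b) := PySem.Int.floordiv_mul_add_mod (a + b) n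
    have : (PySem.Int.mod a n + b) - PySem.Int.mod (a + b) n
         = (PySem.Int.floordiv (a + b) n - PySem.Int.floordiv a n) * n := by
      linear_combination h1 - h2
    rw [this]; exact Dvd.intro_left _ rfl
  · constructor
    · intro hpos; exact ⟨PySem.Int.mod_nonneg _ hpos, PySem.Int.mod_lt _ hpos⟩
    · intro hneg
      have := PySem.Int.mod_neg_bounds (a + b) hneg
      exact ⟨this.1, this.2⟩

-- the triangular closed form: i*(i+1)//2
def pvTri (i : Int) : Int := PySem.Int.floordiv (i * (i + 1)) 2

theorem pvTri_exact (i : Int) : pvTri i * 2 = i * (i + 1) := by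
  have he : (2 : Int) ∣ i * (i + 1) := (Int.even_mul_succ_self i).two_dvd
  have := PySem.Int.floordiv_mul_add_mod (i * (i + 1)) 2
  have hz : PySem.Int.mod (i * (i + 1)) 2 = 0 := (PySem.Int.mod_eq_zero_iff_dvd _ _).2 he
  unfold pvTri; linarith [this, hz]

theorem pvTri_succ (i : Int) : pvTri (i + 1) = pvTri i + (i + 1) := by
  have h1 := pvTri_exact (i + 1)
  have h2 := pvTri_exact i
  nlinarith [h1, h2]

theorem pvTri_zero : pvTri 0 = 0 := by decide

-- the per-index value B computes
def pvF (n start i : Int) : Int :=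
  PySem.Int.mod (PySem.Int.mod start n + PySem.Int.floordiv (i * (i + 1)) 2) n

-- loop invariant for A's fold over the first j indices
theorem pvLoopA (n start : Int) (hn : n ≠ 0) :
    ∀ (k : Nat), (k : Int) ≤ n →
    ((PySem.List.pyRange 0 (k : Int) 1).foldl
      (fun (st : List Int × Int × PySem.Set Int) i =>
        let seen := st.2.2.add st.2.1
        let nums := st.1 ++ [st.2.1]
        let current := if i < n - 1 then PySem.Int.mod (st.2.1 + i + 1) n else st.2.1
        (nums, current, seen))
      ([], PySem.Int.mod start n, PySem.Set.ofList [])).1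
      = (PySem.List.pyRange 0 (k : Int) 1).map (pvF n start) ∧
    ((k : Int) < n →
      ((PySem.List.pyRange 0 (k : Int) 1).foldl
        (fun (st : List Int × Int × PySem.Set Int) i =>
          let seen := st.2.2.add st.2.1
          let nums := st.1 ++ [st.2.1]
          let current := if i < n - 1 then PySem.Int.mod (st.2.1 + i + 1) n else st.2.1
          (nums, current, seen))
        ([], PySem.Int.mod start n, PySem.Set.ofList [])).2.1
        = PySem.Int.mod (start + pvTri (k : Int)) n) := by
  intro k
  induction k with
  | zero =>
    intro _
    constructor
    · simp [PySem.List.pyRange_one_eq_nil (by norm_num : (0:Int) ≤ 0)]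
    · intro _
      simp [PySem.List.pyRange_one_eq_nil (by norm_num : (0:Int) ≤ 0), pvTri_zero]
  | succ m ih =>
    intro hk
    have hm : (m : Int) ≤ n := by push_cast at hk ⊢; linarith
    have hmlt : (m : Int) < n := by push_cast at hk ⊢; linarith
    obtain ⟨ih1, ih2⟩ := ih hm
    have hcur := ih2 hmlt
    have hsplit : PySem.List.pyRange 0 ((m : Nat) + 1 : Int) 1
        = PySem.List.pyRange 0 (m : Int) 1 ++ [(m : Int)] := by
      have := PySem.List.pyRange_one_succ_right (show (0:Int) ≤ (m:Int) from Int.natCast_nonneg m)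
      exact this
    constructor
    · push_cast
      rw [hsplit, List.foldl_append, List.map_append]
      simp only [List.foldl_cons, List.foldl_nil]
      rw [ih1, hcur]
      congr 1
      simp only [List.map_cons, List.map_nil]
      congr 1
      unfold pvF
      rw [← pymod_add n start (pvTri (m : Int)) hn]
      rfl
    · intro hlt
      push_cast at hlt ⊢
      rw [hsplit, List.foldl_append]
      simp only [List.foldl_cons, List.foldl_nil]
      rw [hcur]
      have hcond : ((m : Int) < n - 1) = True := by simp; linarith
      simp only [hcond, if_true]
      have hassoc : PySem.Int.mod (start + pvTri (m : Int)) n + (m : Int) + 1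
          = PySem.Int.mod (start + pvTri (m : Int)) n + ((m : Int) + 1) := by ring
      rw [hassoc, pymod_add n (start + pvTri (m : Int)) ((m : Int) + 1) hn, pvTri_succ (m : Int)]
      ring_nf

-- ===== VERDICT (by name: the statement is the Claim_ definition above) =====
theorem generateCircularArrayWithCycle_spec : Claim_equal_generateCircularArrayWithCycle := by
  intro n start _ hn
  unfold Spec_generateCircularArrayWithCycle generateCircularArrayWithCycle generateCircularArrayWithCycle_alt
  by_cases hle : n ≤ 0
  · simp [PySem.List.pyRange_one_eq_nil hle]
  · have hpos : 0 < n := by omega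
    have hcast : ((n.toNat : Nat) : Int) = n := Int.toNat_of_nonneg (le_of_lt hpos)
    have := (pvLoopA n start hn n.toNat (by rw [hcast])).1
    rw [hcast] at this
    simp only []
    rw [this]
    rfl
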